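-- pv_equiv track=rewrite | github.com/leryowwei/SnakeCharmer | ques_70.py | is_perumutation
-- ===== SOURCE A (Python) =====
-- def is_perumutation(n1, n2):
--     str1 = str(n1)  # Convert numbers to strings
--     str2 = str(n2)
--     if len(str1) == len(str2):  # If equal length strings
--         count1 = [0] * 10  # List of how many times each digit appears
--         count2 = [0] * 10
--         for i in str1:  # for each digit in the string
--             count1[int(i)] += 1  # add one to the count of how many times this digit appears
--         for i in str2:
--             count2[int(i)] += 1
--         if count1 == count2:
--             is_perm = True
--         else:
--             is_perm = False
--     else:  # Can't be a permutation as different length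
--         is_perm = False
--
--     return is_perm
-- ===== SOURCE B (Python) =====
-- def is_perumutation(n1, n2):
--     s1 = str(n1)
--     s2 = str(n2)
--     if len(s1) != len(s2):  # different length: cannot be a permutation
--         return False
--     return sorted(int(c) for c in s1) == sorted(int(c) for c in s2)
-- ===== Notes on version B (the rewrite author's own statement) =====
-- stated objective: idiomatic
-- what changed: Replaces the two hand-maintained 10-slot digit frequency tables with a direct comparison of the sorted digit sequences.
import Mathlib
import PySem

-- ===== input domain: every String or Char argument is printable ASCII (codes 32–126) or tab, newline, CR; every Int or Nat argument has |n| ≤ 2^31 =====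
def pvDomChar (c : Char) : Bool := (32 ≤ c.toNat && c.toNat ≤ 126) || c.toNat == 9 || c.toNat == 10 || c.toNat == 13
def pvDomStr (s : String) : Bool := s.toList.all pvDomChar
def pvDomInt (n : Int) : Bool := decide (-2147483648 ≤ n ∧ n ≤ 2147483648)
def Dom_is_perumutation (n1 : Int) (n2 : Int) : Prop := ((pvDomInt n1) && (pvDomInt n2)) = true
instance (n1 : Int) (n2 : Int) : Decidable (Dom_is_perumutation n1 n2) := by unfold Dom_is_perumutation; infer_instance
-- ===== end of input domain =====

-- B replaces A's two hand-maintained 10-slot digit frequency tables by a comparison of the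
-- sorted digit sequences (idiomatic, not claimed faster).

-- ===== PORT A =====
-- int(i) for a single digit character; exact for '0'..'9' (non-digit characters, i.e. the '-'
-- of a negative number, make Python raise ValueError and are excluded by Pre_).
def pvDigitVal (c : Char) : Nat := c.toNat - 48

def is_perumutation (n1 : Int) (n2 : Int) : Bool :=
  let str1 := PySem.Int.toChars n1
  let str2 := PySem.Int.toChars n2
  if str1.length = str2.length then
    let count1 := str1.foldl (fun cs c => cs.modify (pvDigitVal c) (· + 1)) (List.replicate 10 (0 : Int))
    let count2 := str2.foldl (fun cs c => cs.modify (pvDigitVal c) (· + 1)) (List.replicate 10 (0 : Int))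
    count1 == count2
  else
    false

-- ===== PORT B =====
def is_perumutation_alt (n1 : Int) (n2 : Int) : Bool :=
  let s1 := PySem.Int.toChars n1
  let s2 := PySem.Int.toChars n2
  if s1.length ≠ s2.length then false
  else
    PySem.List.sorted (s1.map (fun c => ((pvDigitVal c : Nat) : Int))) (fun x => x) ==
      PySem.List.sorted (s2.map (fun c => ((pvDigitVal c : Nat) : Int))) (fun x => x)

-- ===== PRECONDITION & SPEC =====
-- Pre_ excludes exactly the inputs where Python A raises ValueError (int('-')): both numbers
-- rendered with equal string length while at least one is negative.  A returns on everything else.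
def Pre_is_perumutation (n1 : Int) (n2 : Int) : Prop :=
  (0 ≤ n1 ∧ 0 ≤ n2) ∨ (PySem.Int.toChars n1).length ≠ (PySem.Int.toChars n2).length
instance (n1 : Int) (n2 : Int) : Decidable (Pre_is_perumutation n1 n2) := by
  unfold Pre_is_perumutation; infer_instance

def pvWitness_is_perumutation : Int × Int := (1234, 4312)

def Spec_is_perumutation (n1 : Int) (n2 : Int) (out : Bool) : Prop := out = is_perumutation_alt n1 n2
instance (n1 : Int) (n2 : Int) (out : Bool) : Decidable (Spec_is_perumutation n1 n2 out) := by
  unfold Spec_is_perumutation; infer_instance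

-- ===== CLAIM (what is proved, stated in full; the proofs are below) =====
def Claim_equal_is_perumutation : Prop := ∀ (n1 : Int) (n2 : Int), Dom_is_perumutation n1 n2 → Pre_is_perumutation n1 n2 → Spec_is_perumutation n1 n2 (is_perumutation n1 n2)

-- ===== LEMMAS AND PROOFS =====

-- Every character of str(n) for 0 ≤ n is a decimal digit.
lemma digitChar_bounds (d : Nat) (hd : d < 10) : 48 ≤ (Nat.digitChar d).toNat ∧ (Nat.digitChar d).toNat ≤ 57 := by
  interval_cases d <;> decide

lemma toDigitsCore_digits :
    ∀ (fuel n : Nat) (ds : List Char),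
      (∀ c ∈ ds, 48 ≤ c.toNat ∧ c.toNat ≤ 57) →
      ∀ c ∈ Nat.toDigitsCore 10 fuel n ds, 48 ≤ c.toNat ∧ c.toNat ≤ 57 := by
  intro fuel
  induction fuel with
  | zero => intro n ds hds c hc; exact hds c hc
  | succ fuel ih =>
    intro n ds hds c hc
    rw [Nat.toDigitsCore] at hc
    by_cases h0 : n / 10 = 0
    · rw [if_pos h0] at hc
      rcases List.mem_cons.mp hc with hc | hc
      · exact hc ▸ digitChar_bounds _ (Nat.mod_lt _ (by norm_num))
      · exact hds c hc
    · rw [if_neg h0] at hc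
      refine ih (n / 10) (Nat.digitChar (n % 10) :: ds) ?_ c hc
      intro c' hc'
      rcases List.mem_cons.mp hc' with hc' | hc'
      · exact hc' ▸ digitChar_bounds _ (Nat.mod_lt _ (by norm_num))
      · exact hds c' hc'

lemma toChars_digits (n : Int) (hn : 0 ≤ n) :
    ∀ c ∈ PySem.Int.toChars n, 48 ≤ c.toNat ∧ c.toNat ≤ 57 := by
  intro c hc
  simp only [PySem.Int.toChars, if_neg (not_lt.mpr hn)] at hc
  exact toDigitsCore_digits _ _ [] (by simp) c hc

-- The counting loop preserves the table length.
lemma foldl_modify_length (ds : List Char) :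
    ∀ (cs : List Int),
      (ds.foldl (fun cs c => cs.modify (pvDigitVal c) (· + 1)) cs).length = cs.length := by
  induction ds with
  | nil => intro cs; rfl
  | cons d ds ih => intro cs; simpa [List.length_modify] using ih (cs.modify (pvDigitVal d) (· + 1))

-- Characterisation of A's counting loop: slot i of the table holds the initial value plus the
-- number of characters whose digit value is i.
lemma foldl_modify_count (ds : List Char) :
    ∀ (cs : List Int), cs.length = 10 →
      (∀ c ∈ ds, pvDigitVal c < 10) →
      ∀ i : Nat, i < 10 →
        (ds.foldl (fun cs c => cs.modify (pvDigitVal c) (· + 1)) cs)[i]! =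
          cs[i]! + (ds.countP (fun c => pvDigitVal c = i) : Int) := by
  induction ds with
  | nil => intro cs _ _ i _; simp only [List.foldl_nil, List.countP_nil, Nat.cast_zero, add_zero]
  | cons d ds ih =>
    intro cs hlen hd i hi
    have hlen' : (cs.modify (pvDigitVal d) (· + 1)).length = 10 := by
      simpa [List.length_modify] using hlen
    have step := ih (cs.modify (pvDigitVal d) (· + 1)) hlen'
      (fun c hc => hd c (List.mem_cons_of_mem _ hc)) i hi
    simp only [List.foldl_cons] at step ⊢
    rw [step]
    have hilt : i < (cs.modify (pvDigitVal d) (· + 1)).length := by omega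
    have hilt' : i < cs.length := by omega
    rw [getElem!_pos (cs.modify (pvDigitVal d) (· + 1)) i hilt, getElem!_pos cs i hilt', List.getElem_modify]
    by_cases heq : pvDigitVal d = i
    · simp [heq]
      ring
    · simp [heq]

-- count of the value i in the mapped digit list = countP of digit value i
lemma count_map_digit (ds : List Char) (a : Int) :
    List.count a (ds.map (fun c => ((pvDigitVal c : Nat) : Int))) =
      ds.countP (fun c => ((pvDigitVal c : Nat) : Int) = a) := by
  rw [List.count, List.countP_map]
  apply List.countP_congr
  intro c _
  by_cases h : ((pvDigitVal c : Nat) : Int) = a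
  · simp [h]
  · simp [h]

-- The two comparisons agree on all-digit strings.
lemma tables_iff_sorted (s1 s2 : List Char)
    (h1 : ∀ c ∈ s1, 48 ≤ c.toNat ∧ c.toNat ≤ 57)
    (h2 : ∀ c ∈ s2, 48 ≤ c.toNat ∧ c.toNat ≤ 57) :
    ((s1.foldl (fun cs c => cs.modify (pvDigitVal c) (· + 1)) (List.replicate 10 (0 : Int))) =
     (s2.foldl (fun cs c => cs.modify (pvDigitVal c) (· + 1)) (List.replicate 10 (0 : Int)))) ↔
    (PySem.List.sorted (s1.map (fun c => ((pvDigitVal c : Nat) : Int))) (fun x => x) =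
     PySem.List.sorted (s2.map (fun c => ((pvDigitVal c : Nat) : Int))) (fun x => x)) := by
  have hd1 : ∀ c ∈ s1, pvDigitVal c < 10 := by
    intro c hc; have := h1 c hc; unfold pvDigitVal; omega
  have hd2 : ∀ c ∈ s2, pvDigitVal c < 10 := by
    intro c hc; have := h2 c hc; unfold pvDigitVal; omega
  have g1 := foldl_modify_count s1 (List.replicate 10 0) (by simp) hd1
  have g2 := foldl_modify_count s2 (List.replicate 10 0) (by simp) hd2
  have hpeq : ∀ (ds : List Char) (i : Nat),
      (ds.countP (fun c => ((pvDigitVal c : Nat) : Int) = ((i : Nat) : Int))) =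
      ds.countP (fun c => pvDigitVal c = i) := by
    intro ds i; apply List.countP_congr; intro c _
    constructor <;> intro h
    · simp only [decide_eq_true_eq] at h ⊢; omega
    · simp only [decide_eq_true_eq] at h ⊢; omega
  rw [PySem.List.sorted_id_eq_sorted_id_iff_perm, List.perm_iff_count]
  constructor
  · -- equal tables → equal counts of every Int value
    intro htab a
    rw [count_map_digit, count_map_digit]
    by_cases ha : 0 ≤ a ∧ a < 10
    · have hi : a.toNat < 10 := by omega
      have hcomp : (s1.foldl (fun cs c => cs.modify (pvDigitVal c) (· + 1))
            (List.replicate 10 (0 : Int)))[a.toNat]! =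
          (s2.foldl (fun cs c => cs.modify (pvDigitVal c) (· + 1))
            (List.replicate 10 (0 : Int)))[a.toNat]! := by rw [htab]
      rw [g1 a.toNat hi, g2 a.toNat hi] at hcomp
      have ha' : ((a.toNat : Nat) : Int) = a := by omega
      have e1 := hpeq s1 a.toNat
      have e2 := hpeq s2 a.toNat
      rw [ha'] at e1 e2
      rw [e1, e2]
      omega
    · -- a out of range: both counts are 0
      have hz : ∀ (ds : List Char), (∀ c ∈ ds, pvDigitVal c < 10) →
          ds.countP (fun c => ((pvDigitVal c : Nat) : Int) = a) = 0 := by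
        intro ds hds
        rw [List.countP_eq_zero]
        intro c hc
        have := hds c hc
        simp only [decide_eq_true_eq]
        omega
      rw [hz s1 hd1, hz s2 hd2]
  · -- equal counts → equal tables, componentwise
    intro hcnt
    have hl1 := foldl_modify_length s1 (List.replicate 10 (0 : Int))
    have hl2 := foldl_modify_length s2 (List.replicate 10 (0 : Int))
    apply List.ext_getElem (by rw [hl1, hl2])
    intro i hi _
    have hi10 : i < 10 := by rw [hl1] at hi; simpa using hi
    have hilen : i < (List.foldl (fun cs c => cs.modify (pvDigitVal c) (· + 1)) (List.replicate 10 (0:Int)) s2).length := by rw [hl2]; simpa using hi10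
    rw [← getElem!_pos _ i hi, ← getElem!_pos _ i hilen]
    rw [g1 i hi10, g2 i hi10]
    have := hcnt ((i : Nat) : Int)
    rw [count_map_digit, count_map_digit, hpeq s1 i, hpeq s2 i] at this
    omega

-- ===== VERDICT (by name: the statement is the Claim_ definition above) =====
theorem is_perumutation_spec : Claim_equal_is_perumutation := by
  intro n1 n2 _ hpre
  unfold Spec_is_perumutation is_perumutation is_perumutation_alt
  by_cases hlen : (PySem.Int.toChars n1).length = (PySem.Int.toChars n2).length
  · -- equal lengths: Pre_ forces both numbers nonnegative, so every character is a digit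
    have hnn : 0 ≤ n1 ∧ 0 ≤ n2 := by
      rcases hpre with h | h
      · exact h
      · exact absurd hlen h
    simp only [if_pos hlen, if_neg (not_not.mpr hlen)]
    rw [Bool.eq_iff_iff, beq_iff_eq, beq_iff_eq]
    exact tables_iff_sorted _ _ (toChars_digits n1 hnn.1) (toChars_digits n2 hnn.2)
  · simp only [if_neg hlen, if_pos hlen]
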